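-- pv_equiv track=rewrite | github.com/genesisrhapsodos98/advent-of-code | lib/graph.py | longest_minimal_path_length
-- ===== SOURCE A (Python) =====
-- import heapq
--
-- def longest_minimal_path_length(graph, start):
--     '''Returns the destination and length of the longest minimal path from
--     start to somewhere in the graph.
--
--     graph[node] must return a list of (neighbor, distance) pairs
--     '''
--     seen = set()
--     queue = [(0, start)]
--
--     max_dist = 0
--     furthest_node = start
--     while len(queue) > 0:
--         current_dist, current_node = heapq.heappop(queue)
--         if current_node in seen:
--             continue
--
--         seen.add(current_node)
--         if current_dist > max_dist:
--             max_dist = current_dist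
--             furthest_node = current_node
--
--         for neighbor_node, neighbor_dist in graph[current_node]:
--             if neighbor_node in seen:
--                 continue
--             heapq.heappush(queue, (current_dist + neighbor_dist,
--                                    neighbor_node))
--     return furthest_node, max_dist
-- ===== SOURCE B (Python) =====
-- def _insort(lst, item):
--     '''Return a copy of sorted list lst with item inserted, keeping it sorted
--     (inserted before any equal elements).'''
--     i = 0
--     while i < len(lst) and lst[i] < item:
--         i += 1
--     return lst[:i] + [item] + lst[i:]
--
-- def longest_minimal_path_length(graph, start):
--     '''Returns the destination and length of the longest minimal path from
--     start to somewhere in the graph.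
--
--     graph[node] must return a list of (neighbor, distance) pairs
--     '''
--     # Phase 1: settle shortest distances into an insertion-ordered dict,
--     # using a frontier kept sorted by insertion; pop its head each round.
--     dist = {}
--     frontier = [(0, start)]
--     while frontier:
--         d, node = frontier.pop(0)
--         if node in dist:
--             continue
--         dist[node] = d
--         for m, w in graph[node]:
--             if m not in dist:
--                 frontier = _insort(frontier, (d + w, m))
--     # Phase 2: scan the settled distances for the farthest node.
--     best_node, best_dist = start, 0
--     for node, d in dist.items():
--         if d > best_dist:
--             best_node, best_dist = node, d
--     return best_node, best_dist
-- ===== Notes on version B (the rewrite author's own statement) =====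
-- stated objective: alternative
-- what changed: A's heap loop with a separate seen set and interleaved argmax bookkeeping is replaced by a frontier kept as a sorted list (sorted insertion on push, pop the head), with the settled-distance dict doubling as the seen set, followed by a separate scan of the settled distances for the farthest node.
import Mathlib
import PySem

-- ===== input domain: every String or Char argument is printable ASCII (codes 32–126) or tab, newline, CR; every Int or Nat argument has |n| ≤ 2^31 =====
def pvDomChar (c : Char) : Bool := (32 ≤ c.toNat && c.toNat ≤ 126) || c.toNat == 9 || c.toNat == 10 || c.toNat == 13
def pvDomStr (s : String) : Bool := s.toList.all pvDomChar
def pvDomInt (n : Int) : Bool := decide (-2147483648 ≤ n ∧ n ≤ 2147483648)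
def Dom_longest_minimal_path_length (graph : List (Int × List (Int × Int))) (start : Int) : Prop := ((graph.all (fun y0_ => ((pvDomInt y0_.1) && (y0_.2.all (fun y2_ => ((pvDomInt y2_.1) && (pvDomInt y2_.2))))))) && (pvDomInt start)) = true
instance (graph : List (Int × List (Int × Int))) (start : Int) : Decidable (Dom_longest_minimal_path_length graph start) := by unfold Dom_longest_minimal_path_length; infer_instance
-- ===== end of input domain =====

-- B replaces A's heap+seen loop with interleaved argmax by a sorted-insertion frontier whose
-- head is popped, the settled-distance dict doubling as the seen set, then a separate scan
-- for the farthest node; the return value is proved equal. Neither function mutates its arguments.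

-- ===== PORT A =====
-- heapq.heappop on a list of (dist, node) pairs returns the lexicographically smallest pair;
-- pvMinOf computes it, and the pop removes one copy of it (List.erase).
def pvLess (p q : Int × Int) : Bool := p.1 < q.1 || (p.1 == q.1 && p.2 < q.2)

def pvMinOf (x : Int × Int) (t : List (Int × Int)) : Int × Int :=
  t.foldl (fun m y => if pvLess y m then y else m) x

-- pvMinOf is an element of the popped list (used by port A's termination proof)
theorem pvMinOf_mem (x : Int × Int) (t : List (Int × Int)) : pvMinOf x t ∈ x :: t := by
  induction t generalizing x with
  | nil => simp [pvMinOf]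
  | cons y t ih =>
    have h := ih (if pvLess y x then y else x)
    simp only [pvMinOf, List.foldl_cons] at h ⊢
    rcases List.mem_cons.1 h with h | h
    · rw [h]; split <;> simp
    · simp [h]

-- a strictly smaller countP when one counted element stops satisfying the predicate
-- (used by the ports' termination proofs)
theorem pvCountP_lt {l : List Int} {p q : Int → Bool} (hmono : ∀ x, q x = true → p x = true)
    {a : Int} (ha : a ∈ l) (hpa : p a = true) (hqa : q a = false) :
    l.countP q < l.countP p := by
  induction l with
  | nil => cases ha
  | cons b t ih =>
    simp only [List.countP_cons]
    rcases List.mem_cons.1 ha with rfl | hat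
    · have hle : t.countP q ≤ t.countP p := by
        apply List.countP_mono_left; intro x _ hx; exact hmono x hx
      simp [hpa, hqa]; omega
    · have := ih hat
      have hqp : q b = true → p b = true := hmono b
      cases hq : q b <;> cases hp : p b <;> simp_all <;> omega

-- the while-loop of A: state (queue, seen, max_dist, furthest_node)
def pvGoA (g : PySem.Dict Int (List (Int × Int))) (queue : List (Int × Int))
    (seen : PySem.Set Int) (maxd far : Int) : Int × Int :=
  match queue with
  | [] => (far, maxd)
  | x :: t =>
    let m := pvMinOf x t
    let q := (x :: t).erase m
    if hseen : PySem.Set.contains seen m.2 then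
      pvGoA g q seen maxd far
    else
      match hg : g.get? m.2 with
      | none => (far, maxd)   -- Python: KeyError (graph[current_node]); excluded by Pre_
      | some adj =>
        let seen' := PySem.Set.add seen m.2
        let far' := if m.1 > maxd then m.2 else far
        let maxd' := if m.1 > maxd then m.1 else maxd
        pvGoA g (q ++ (adj.filter (fun e => !(PySem.Set.contains seen' e.1))).map
            (fun e => (m.1 + e.2, e.1))) seen' maxd' far'
termination_by (g.keys.countP (fun k => !(PySem.Set.contains seen k)), queue.length)
decreasing_by
  · apply Prod.Lex.right
    have h := List.length_erase_of_mem (pvMinOf_mem x t)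
    simp only [h]; simp
  · apply Prod.Lex.left
    apply pvCountP_lt (a := (pvMinOf x t).2)
    · intro k hk
      simp only [Bool.not_eq_true'] at hk ⊢
      cases hc : PySem.Set.contains seen k
      · rfl
      · exfalso
        have hmem : k ∈ PySem.Set.add seen (pvMinOf x t).2 :=
          (PySem.Set.mem_add _ _ _).2 (Or.inl ((PySem.Set.contains_iff _ _).1 hc))
        have h2 := (PySem.Set.contains_iff _ _).2 hmem
        rw [hk] at h2; exact Bool.false_ne_true h2
    · rw [← PySem.Dict.contains_iff_mem_keys, PySem.Dict.contains_eq_isSome_get?, hg]; rfl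
    · simp only [Bool.not_eq_true']
      cases h : PySem.Set.contains seen (pvMinOf x t).2
      · rfl
      · exact absurd h hseen
    · have hmem : (pvMinOf x t).2 ∈ PySem.Set.add seen (pvMinOf x t).2 :=
        (PySem.Set.mem_add _ _ _).2 (Or.inr rfl)
      have h2 := (PySem.Set.contains_iff _ _).2 hmem
      simp [h2]

def longest_minimal_path_length (graph : List (Int × List (Int × Int))) (start : Int) : Int × Int :=
  pvGoA (PySem.Dict.ofList graph) [((0 : Int), start)] PySem.Set.empty 0 start

-- ===== PORT B =====
-- _insort of Source B: scan past the strictly smaller elements, splice the item in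
def pvInsort (l : List (Int × Int)) (a : Int × Int) : List (Int × Int) :=
  match l with
  | [] => [a]
  | b :: t => if pvLess b a then b :: pvInsort t a else a :: b :: t

-- phase 1 of B: the settle loop over a sorted frontier; the dist dict doubles as the seen set
def pvGoB (g : PySem.Dict Int (List (Int × Int))) (frontier : List (Int × Int))
    (dist : PySem.Dict Int Int) : PySem.Dict Int Int :=
  match frontier with
  | [] => dist
  | m :: rest =>
    if hseen : PySem.Dict.contains dist m.2 then
      pvGoB g rest dist
    else
      match hg : g.get? m.2 with
      | none => dist   -- Python: KeyError (graph[node]); excluded by Pre_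
      | some adj =>
        let dist' := dist.insert m.2 m.1
        pvGoB g (adj.foldl (fun f e =>
            if PySem.Dict.contains dist' e.1 then f else pvInsort f (m.1 + e.2, e.1)) rest) dist'
termination_by (g.keys.countP (fun k => !(dist.contains k)), frontier.length)
decreasing_by
  · apply Prod.Lex.right; simp
  · apply Prod.Lex.left
    apply pvCountP_lt (a := m.2)
    · intro k hk
      simp only [Bool.not_eq_true'] at hk ⊢
      rw [PySem.Dict.contains_insert] at hk
      cases hc : PySem.Dict.contains dist k
      · rfl
      · simp [hc] at hk
    · rw [← PySem.Dict.contains_iff_mem_keys, PySem.Dict.contains_eq_isSome_get?, hg]; rfl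
    · simp only [Bool.not_eq_true']
      cases h : PySem.Dict.contains dist m.2
      · rfl
      · exact absurd h hseen
    · simp [PySem.Dict.contains_insert]

-- phase 2 of B: the scan over the settled distances
def pvStep (best : Int × Int) (e : Int × Int) : Int × Int :=
  if e.2 > best.2 then (e.1, e.2) else best

def longest_minimal_path_length_alt (graph : List (Int × List (Int × Int))) (start : Int) : Int × Int :=
  let dist := pvGoB (PySem.Dict.ofList graph) [((0 : Int), start)] PySem.Dict.empty
  dist.items.foldl pvStep (start, 0)

-- ===== PRECONDITION & SPEC =====
-- Pre_ is exactly the domain on which Python A returns normally: every node reachable from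
-- start (through the keyed adjacency lists) must itself be a key, otherwise graph[node]
-- raises KeyError. Reachability is computed as a plain transitive-closure iteration over the
-- dict's items (no distances, queue or argmax — not either port's algorithm).
def pvExpand (items : List (Int × List (Int × Int))) (s : PySem.Set Int) : PySem.Set Int :=
  items.foldl (fun acc p =>
    if PySem.Set.contains acc p.1 then PySem.Set.update acc (p.2.map Prod.fst) else acc) s

def pvReach (graph : List (Int × List (Int × Int))) (start : Int) : PySem.Set Int :=
  (List.range (graph.length + 1)).foldl
    (fun s _ => pvExpand (PySem.Dict.ofList graph).items s)
    (PySem.Set.add PySem.Set.empty start)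

def Pre_longest_minimal_path_length (graph : List (Int × List (Int × Int))) (start : Int) : Prop :=
  ∀ n ∈ pvReach graph start, n ∈ graph.map Prod.fst
instance (graph : List (Int × List (Int × Int))) (start : Int) : Decidable (Pre_longest_minimal_path_length graph start) := by unfold Pre_longest_minimal_path_length; infer_instance

def pvWitness_longest_minimal_path_length : (List (Int × List (Int × Int))) × Int :=
  ([(0, [(1, 2)]), (1, [])], 0)

def Spec_longest_minimal_path_length (graph : List (Int × List (Int × Int))) (start : Int) (out : Int × Int) : Prop := out = longest_minimal_path_length_alt graph start
instance (graph : List (Int × List (Int × Int))) (start : Int) (out : Int × Int) : Decidable (Spec_longest_minimal_path_length graph start out) := by unfold Spec_longest_minimal_path_length; infer_instance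

-- ===== CLAIM (what is proved, stated in full; the proofs are below) =====
def Claim_equal_longest_minimal_path_length : Prop := ∀ (graph : List (Int × List (Int × Int))) (start : Int), Dom_longest_minimal_path_length graph start → Pre_longest_minimal_path_length graph start → Spec_longest_minimal_path_length graph start (longest_minimal_path_length graph start)

-- ===== LEMMAS AND PROOFS =====

-- the lexicographic order on (dist, node) pairs: basic facts
def pvLe (p q : Int × Int) : Bool := p.1 < q.1 || (p.1 == q.1 && p.2 ≤ q.2)

theorem pvLe_refl (p : Int × Int) : pvLe p p = true := by simp [pvLe]

theorem pvLe_trans {a b c : Int × Int} (h1 : pvLe a b = true) (h2 : pvLe b c = true) :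
    pvLe a c = true := by
  simp [pvLe] at h1 h2 ⊢; omega

theorem pvLe_antisymm {a b : Int × Int} (h1 : pvLe a b = true) (h2 : pvLe b a = true) :
    a = b := by
  rcases a with ⟨a1, a2⟩; rcases b with ⟨b1, b2⟩
  simp [pvLe] at h1 h2 ⊢
  omega

theorem pvLess_le {a b : Int × Int} (h : pvLess a b = true) : pvLe a b = true := by
  simp [pvLess] at h; simp [pvLe]; omega

theorem not_pvLess_le {a b : Int × Int} (h : pvLess a b = false) : pvLe b a = true := by
  simp [pvLess] at h; simp [pvLe]; omega

-- pvMinOf is a lower bound of the popped list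
theorem pvMinOf_le (x : Int × Int) (t : List (Int × Int)) :
    ∀ y ∈ x :: t, pvLe (pvMinOf x t) y = true := by
  induction t generalizing x with
  | nil =>
    intro y hy
    have hx : y = x := by simpa using hy
    subst hx
    simpa [pvMinOf] using pvLe_refl y
  | cons b t ih =>
    intro y hy
    have hstep : pvMinOf x (b :: t) = pvMinOf (if pvLess b x then b else x) t := rfl
    have hx'x : pvLe (if pvLess b x then b else x) x = true := by
      cases h : pvLess b x
      · simp [h, pvLe_refl]
      · simp [h]; exact pvLess_le h
    have hx'b : pvLe (if pvLess b x then b else x) b = true := by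
      cases h : pvLess b x
      · simp [h]; exact not_pvLess_le h
      · simp [h, pvLe_refl]
    have hmin : pvLe (pvMinOf (if pvLess b x then b else x) t) (if pvLess b x then b else x) = true :=
      ih _ _ (List.mem_cons_self ..)
    rw [hstep]
    rcases List.mem_cons.1 hy with rfl | hy'
    · exact pvLe_trans hmin hx'x
    · rcases List.mem_cons.1 hy' with rfl | hyt
      · exact pvLe_trans hmin hx'b
      · exact ih _ _ (List.mem_cons_of_mem _ hyt)

-- the head of a sorted permutation of x :: t is the lexicographic minimum pvMinOf x t
theorem pvMin_eq_head {x : Int × Int} {t s' : List (Int × Int)} {m' : Int × Int}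
    (hp : (x :: t).Perm (m' :: s'))
    (hs : List.Pairwise (fun p q => pvLe p q = true) (m' :: s')) :
    m' = pvMinOf x t := by
  have hmem : pvMinOf x t ∈ m' :: s' := hp.mem_iff.mp (pvMinOf_mem x t)
  have h1 : pvLe m' (pvMinOf x t) = true := by
    rcases List.mem_cons.1 hmem with h | h
    · rw [h]; exact pvLe_refl _
    · exact (List.pairwise_cons.mp hs).1 _ h
  have h2 : pvLe (pvMinOf x t) m' = true :=
    pvMinOf_le x t m' (hp.mem_iff.mpr (List.mem_cons_self ..))
  exact pvLe_antisymm h1 h2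

-- pvInsort is a permutation of consing, and preserves sortedness
theorem pvInsort_perm (l : List (Int × Int)) (a : Int × Int) :
    (pvInsort l a).Perm (a :: l) := by
  induction l with
  | nil => simp [pvInsort]
  | cons b t ih =>
    rw [pvInsort]
    split
    · exact (ih.cons b).trans (List.Perm.swap a b t)
    · exact List.Perm.refl _

theorem pvInsort_sorted {l : List (Int × Int)} (a : Int × Int)
    (h : List.Pairwise (fun p q => pvLe p q = true) l) :
    List.Pairwise (fun p q => pvLe p q = true) (pvInsort l a) := by
  induction l with
  | nil => simp [pvInsort]
  | cons b t ih =>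
    obtain ⟨hb, ht⟩ := List.pairwise_cons.mp h
    rw [pvInsort]
    split
    · rename_i hba
      refine List.pairwise_cons.mpr ⟨?_, ih ht⟩
      intro z hz
      rcases List.mem_cons.1 ((pvInsort_perm t a).mem_iff.mp hz) with rfl | hzt
      · exact pvLess_le hba
      · exact hb z hzt
    · rename_i hba
      refine List.pairwise_cons.mpr ⟨?_, h⟩
      intro z hz
      have hab : pvLe a b = true := not_pvLess_le (Bool.not_eq_true _ ▸ eq_false_of_ne_true hba)
      rcases List.mem_cons.1 hz with rfl | hzt
      · exact hab
      · exact pvLe_trans hab (hb z hzt)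

-- B's neighbor-push fold equals (up to permutation) A's filtered append
theorem pvFoldPush_perm (c : Int → Bool) (d : Int) (adj : List (Int × Int)) :
    ∀ rest : List (Int × Int),
      (adj.foldl (fun f e => if c e.1 then f else pvInsort f (d + e.2, e.1)) rest).Perm
        (rest ++ (adj.filter (fun e => !(c e.1))).map (fun e => (d + e.2, e.1))) := by
  induction adj with
  | nil => intro rest; simp
  | cons e t ih =>
    intro rest
    simp only [List.foldl_cons, List.filter_cons]
    cases hc : c e.1
    · simp only [hc, Bool.not_false, if_false, List.map_cons]
      refine (ih (pvInsort rest (d + e.2, e.1))).trans ?_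
      refine (((pvInsort_perm rest (d + e.2, e.1)).append_right _).trans ?_)
      exact List.perm_middle.symm
    · simpa [hc] using ih rest

theorem pvFoldPush_sorted (c : Int → Bool) (d : Int) (adj : List (Int × Int)) :
    ∀ rest : List (Int × Int), List.Pairwise (fun p q => pvLe p q = true) rest →
      List.Pairwise (fun p q => pvLe p q = true)
        (adj.foldl (fun f e => if c e.1 then f else pvInsort f (d + e.2, e.1)) rest) := by
  induction adj with
  | nil => intro rest h; simpa using h
  | cons e t ih =>
    intro rest h
    simp only [List.foldl_cons]
    cases hc : c e.1
    · simpa [hc] using ih _ (pvInsort_sorted _ h)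
    · simpa [hc] using ih rest h

-- the loop invariant: if B's frontier is a sorted permutation of A's queue, seen and dist
-- agree as sets, and (far, maxd) is the scan of dist so far, then A's interleaved loop
-- equals B's settle loop followed by the scan
theorem pvLoop_eq (g : PySem.Dict Int (List (Int × Int))) (p0 : Int × Int)
    (queue : List (Int × Int)) (seen : PySem.Set Int) (maxd far : Int) :
    ∀ (s : List (Int × Int)) (dist : PySem.Dict Int Int),
      queue.Perm s →
      List.Pairwise (fun p q => pvLe p q = true) s →
      (∀ k : Int, PySem.Set.contains seen k = PySem.Dict.contains dist k) →
      dist.keys.Nodup →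
      dist.items.foldl pvStep p0 = (far, maxd) →
      pvGoA g queue seen maxd far = (pvGoB g s dist).items.foldl pvStep p0 := by
  induction queue, seen, maxd, far using pvGoA.induct g with
  | case1 seen maxd far =>
    intro s dist hperm hsort hc hnd hfold
    have hs : s = [] := hperm.symm.eq_nil
    subst hs
    rw [pvGoA, pvGoB, hfold]
  | case2 seen maxd far x t m q hseen ih =>
    intro s dist hperm hsort hc hnd hfold
    obtain ⟨m', s', rfl⟩ : ∃ m' s', s = m' :: s' := by
      cases s with
      | nil => exact absurd hperm.eq_nil (by simp)
      | cons a b => exact ⟨a, b, rfl⟩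
    have hm : m' = pvMinOf x t := pvMin_eq_head hperm hsort
    subst hm
    have hd : PySem.Dict.contains dist (pvMinOf x t).2 = true := by rw [← hc]; exact hseen
    rw [pvGoA, pvGoB, dif_pos hseen, dif_pos hd]
    have hq : ((x :: t).erase (pvMinOf x t)).Perm s' := by
      have h := hperm.erase (pvMinOf x t)
      rwa [List.erase_cons_head] at h
    exact ih s' dist hq (List.pairwise_cons.mp hsort).2 hc hnd hfold
  | case3 seen maxd far x t m hseen hg =>
    intro s dist hperm hsort hc hnd hfold
    obtain ⟨m', s', rfl⟩ : ∃ m' s', s = m' :: s' := by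
      cases s with
      | nil => exact absurd hperm.eq_nil (by simp)
      | cons a b => exact ⟨a, b, rfl⟩
    have hm : m' = pvMinOf x t := pvMin_eq_head hperm hsort
    subst hm
    have hd : ¬ PySem.Dict.contains dist (pvMinOf x t).2 = true := by rw [← hc]; exact hseen
    rw [pvGoA, pvGoB, dif_neg hseen, dif_neg hd]
    split
    · exact hfold.symm
    · rename_i adj1 heq1
      have hg' : g.get? (pvMinOf x t).2 = none := hg
      rw [heq1] at hg'
      simp at hg'
  | case4 seen maxd far x t m q hseen adj hg seen2 far2 maxd2 ih =>
    intro s dist hperm hsort hc hnd hfold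
    obtain ⟨m', s', rfl⟩ : ∃ m' s', s = m' :: s' := by
      cases s with
      | nil => exact absurd hperm.eq_nil (by simp)
      | cons a b => exact ⟨a, b, rfl⟩
    have hm : m' = pvMinOf x t := pvMin_eq_head hperm hsort
    subst hm
    have hd : ¬ PySem.Dict.contains dist (pvMinOf x t).2 = true := by rw [← hc]; exact hseen
    have hg' : g.get? (pvMinOf x t).2 = some adj := hg
    rw [pvGoA, pvGoB, dif_neg hseen, dif_neg hd]
    have hdc : PySem.Dict.contains dist (pvMinOf x t).2 = false := eq_false_of_ne_true hd
    have hc' : ∀ k : Int, PySem.Set.contains (PySem.Set.add seen (pvMinOf x t).2) k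
        = PySem.Dict.contains (dist.insert (pvMinOf x t).2 (pvMinOf x t).1) k := by
      intro k
      rw [PySem.Dict.contains_insert, ← hc]
      cases hk : PySem.Set.contains (PySem.Set.add seen (pvMinOf x t).2) k
      · have hnot : ¬ (k ∈ seen ∨ k = (pvMinOf x t).2) := by
          rw [← PySem.Set.mem_add, ← PySem.Set.contains_iff, hk]; simp
        push_neg at hnot
        have h1 : PySem.Set.contains seen k = false := by
          cases h : PySem.Set.contains seen k
          · rfl
          · exact absurd ((PySem.Set.contains_iff _ _).1 h) hnot.1
        have h2 : (k == (pvMinOf x t).2) = false := by simp [hnot.2]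
        rw [h1, h2]
        rfl
      · have hmem : k ∈ seen ∨ k = (pvMinOf x t).2 :=
          (PySem.Set.mem_add _ _ _).1 ((PySem.Set.contains_iff _ _).1 hk)
        rcases hmem with h | rfl
        · rw [(PySem.Set.contains_iff _ _).2 h]; simp
        · simp
    have hitems : (dist.insert (pvMinOf x t).2 (pvMinOf x t).1).items
        = dist.items ++ [((pvMinOf x t).2, (pvMinOf x t).1)] := by
      simp [PySem.Dict.items_insert, hdc]
    have hnd' : (dist.insert (pvMinOf x t).2 (pvMinOf x t).1).keys.Nodup :=
      PySem.Dict.nodup_keys_insert dist _ _ hnd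
    have hfold' : (dist.insert (pvMinOf x t).2 (pvMinOf x t).1).items.foldl pvStep p0
        = ((if (pvMinOf x t).1 > maxd then (pvMinOf x t).2 else far),
           (if (pvMinOf x t).1 > maxd then (pvMinOf x t).1 else maxd)) := by
      rw [hitems, List.foldl_append, hfold]
      simp only [List.foldl_cons, List.foldl_nil, pvStep]
      by_cases h : (pvMinOf x t).1 > maxd <;> simp [h]
    have hfilter : (fun e : Int × Int =>
          !(PySem.Set.contains (PySem.Set.add seen (pvMinOf x t).2) e.1))
        = (fun e : Int × Int =>
          !(PySem.Dict.contains (dist.insert (pvMinOf x t).2 (pvMinOf x t).1) e.1)) := by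
      funext e; rw [hc' e.1]
    have hq : ((x :: t).erase (pvMinOf x t)).Perm s' := by
      have h := hperm.erase (pvMinOf x t)
      rwa [List.erase_cons_head] at h
    have hsort' : List.Pairwise (fun p q => pvLe p q = true) s' :=
      (List.pairwise_cons.mp hsort).2
    split
    · rename_i heq1
      rw [heq1] at hg'
      simp at hg'
    · rename_i adj1 heq1
      rw [heq1] at hg'
      injection hg' with e1
      subst e1
      apply ih _ (dist.insert (pvMinOf x t).2 (pvMinOf x t).1)
      · -- permutation of A's new queue with B's new frontier
        rw [hfilter]
        refine (hq.append_right _).trans ?_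
        exact (pvFoldPush_perm
          (fun k => PySem.Dict.contains (dist.insert (pvMinOf x t).2 (pvMinOf x t).1) k)
          (pvMinOf x t).1 adj1 s').symm
      · exact pvFoldPush_sorted _ _ adj1 s' hsort'
      · exact hc'
      · exact hnd'
      · exact hfold'

-- ===== VERDICT (by name: the statement is the Claim_ definition above) =====
theorem longest_minimal_path_length_spec : Claim_equal_longest_minimal_path_length := by
  intro graph start _ _
  unfold Spec_longest_minimal_path_length
  unfold longest_minimal_path_length longest_minimal_path_length_alt
  exact pvLoop_eq (PySem.Dict.ofList graph) (start, 0) [((0 : Int), start)]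
    PySem.Set.empty 0 start [((0 : Int), start)] PySem.Dict.empty
    (List.Perm.refl _) (by simp) (fun k => rfl) PySem.Dict.nodup_keys_empty rfl
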